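-- pv_equiv track=rewrite | github.com/Krearden/NumericalMethods | LR2/main.py | getSecondNorma
-- ===== SOURCE A (Python) =====
-- def getSecondNorma(A):
--     n = len(A)
--     summ = 0
--     max_summ = 0
--     for i in range(n):
--         for j in range(n):
--             summ += abs(A[j][i])
--         if summ > max_summ:
--             max_summ = summ
--         summ = 0
--     return max_summ
-- ===== SOURCE B (Python) =====
-- def getSecondNorma(A):
--     n = len(A)
--
--     def colsum(i, lo, hi):
--         # sum of abs(A[j][i]) for lo <= j < hi, by halving the row range
--         if hi - lo <= 1:
--             return abs(A[lo][i]) if hi - lo == 1 else 0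
--         mid = (lo + hi) // 2
--         return colsum(i, lo, mid) + colsum(i, mid, hi)
--
--     def best(lo, hi):
--         # max column abs-sum over columns lo <= i < hi (0 if the range is empty)
--         if hi - lo <= 1:
--             return colsum(lo, 0, n) if hi - lo == 1 else 0
--         mid = (lo + hi) // 2
--         return max(best(lo, mid), best(mid, hi))
--
--     return best(0, n)
-- ===== Notes on version B (the rewrite author's own statement) =====
-- stated objective: alternative
-- what changed: Replaces A's iterative double loop with running-sum/running-max accumulators by a divide-and-conquer recursion: each column's absolute sum is computed by recursively halving the row range, and the maximum over columns by recursively halving the column range; no accumulator state at all.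
import Mathlib
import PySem

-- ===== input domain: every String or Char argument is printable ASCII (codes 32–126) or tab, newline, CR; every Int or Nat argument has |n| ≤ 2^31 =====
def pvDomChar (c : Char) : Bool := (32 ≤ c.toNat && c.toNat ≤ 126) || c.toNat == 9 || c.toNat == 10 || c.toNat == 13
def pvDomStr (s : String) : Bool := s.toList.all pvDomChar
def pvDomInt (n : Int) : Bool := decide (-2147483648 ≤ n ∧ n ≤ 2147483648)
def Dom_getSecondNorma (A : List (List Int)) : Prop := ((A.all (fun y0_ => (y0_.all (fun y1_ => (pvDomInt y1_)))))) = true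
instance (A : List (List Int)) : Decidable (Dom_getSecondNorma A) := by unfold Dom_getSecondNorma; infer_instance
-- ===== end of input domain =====

-- B replaces A's accumulator double loop by a divide-and-conquer recursion (halving the row range
-- for each column sum, and the column range for the maximum); same cost, different algorithmic structure.


-- ===== PORT A =====
def getSecondNorma (A : List (List Int)) : Int :=
  let n : Int := A.length
  ((PySem.List.pyRange 0 n 1).foldl
    (fun (p : Int × Int) i =>
      let s := (PySem.List.pyRange 0 n 1).foldl
        (fun summ j => summ + |PySem.List.pyGetD (PySem.List.pyGetD A j []) i 0|) p.1
      (0, if s > p.2 then s else p.2))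
    (0, 0)).2

-- ===== PORT B =====
-- colsum(i, lo, hi): sum of |A[j][i]| for lo <= j < hi, by halving the row range.
-- (Python indices here are always nonnegative, so A[j][i] is ported with List.getD on Nat indices.)
def altColsum (A : List (List Int)) (i lo hi : Nat) : Int :=
  if hi - lo ≤ 1 then
    (if hi - lo = 1 then |(A.getD lo []).getD i 0| else 0)
  else
    let mid := (lo + hi) / 2
    altColsum A i lo mid + altColsum A i mid hi
termination_by hi - lo
decreasing_by all_goals omega

-- best(lo, hi): max column abs-sum over columns lo <= i < hi (0 if the range is empty)
def altBest (A : List (List Int)) (lo hi : Nat) : Int :=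
  if hi - lo ≤ 1 then
    (if hi - lo = 1 then altColsum A lo 0 A.length else 0)
  else
    let mid := (lo + hi) / 2
    max (altBest A lo mid) (altBest A mid hi)
termination_by hi - lo
decreasing_by all_goals omega

def getSecondNorma_alt (A : List (List Int)) : Int :=
  altBest A 0 A.length

-- ===== PRECONDITION & SPEC =====
-- Pre_ excludes exactly the inputs on which Python's A[j][i] raises IndexError:
-- some row shorter than the number of rows.
def Pre_getSecondNorma (A : List (List Int)) : Prop := ∀ row ∈ A, A.length ≤ row.length
instance (A : List (List Int)) : Decidable (Pre_getSecondNorma A) := by unfold Pre_getSecondNorma; infer_instance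
def pvWitness_getSecondNorma : List (List Int) := [[1, -2], [3, 4]]

def Spec_getSecondNorma (A : List (List Int)) (out : Int) : Prop := out = getSecondNorma_alt A
instance (A : List (List Int)) (out : Int) : Decidable (Spec_getSecondNorma A out) := by unfold Spec_getSecondNorma; infer_instance

-- ===== CLAIM (what is proved, stated in full; the proofs are below) =====
def Claim_equal_getSecondNorma : Prop := ∀ (A : List (List Int)), Dom_getSecondNorma A → Pre_getSecondNorma A → Spec_getSecondNorma A (getSecondNorma A)

-- ===== LEMMAS AND PROOFS =====

-- |A[j][i]| as a total function on Nat indices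
def pvEnt (A : List (List Int)) (j i : Nat) : Int := |(A.getD j []).getD i 0|

-- column absolute sum of column i over all rows
def pvCol (A : List (List Int)) (i : Nat) : Int :=
  ((List.range A.length).map (fun j => pvEnt A j i)).sum

-- max with 0 of a list (the semantics of both sides' maxima)
def pvMax (l : List Int) : Int := l.foldr max 0

theorem pvMax_nonneg (l : List Int) : 0 ≤ pvMax l := by
  induction l with
  | nil => simp [pvMax]
  | cons a t ih => simp only [pvMax, List.foldr_cons] at *; exact le_max_of_le_right ih

theorem pvMax_append (l₁ l₂ : List Int) : pvMax (l₁ ++ l₂) = max (pvMax l₁) (pvMax l₂) := by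
  induction l₁ with
  | nil =>
    simp only [List.nil_append, pvMax, List.foldr_nil]
    exact (max_eq_right (pvMax_nonneg l₂)).symm
  | cons a t ih =>
    simp only [List.cons_append, pvMax, List.foldr_cons] at *
    rw [ih, max_assoc]

-- colsum computes the sum of pvEnt over the row range
theorem altColsum_eq (A : List (List Int)) (i : Nat) :
    ∀ (k lo hi : Nat), hi - lo = k → lo ≤ hi →
      altColsum A i lo hi = ((List.range' lo (hi - lo)).map (fun j => pvEnt A j i)).sum := by
  intro k
  induction k using Nat.strong_induction_on with
  | _ k ih =>
    intro lo hi hk hle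
    rw [altColsum]
    by_cases h1 : hi - lo ≤ 1
    · rw [if_pos h1]
      by_cases h0 : hi - lo = 1
      · simp [h0, pvEnt]
      · have : hi - lo = 0 := by omega
        simp [this]
    · rw [if_neg h1]
      have e1 := ih ((lo + hi) / 2 - lo) (by omega) lo ((lo + hi) / 2) rfl (by omega)
      have e2 := ih (hi - (lo + hi) / 2) (by omega) ((lo + hi) / 2) hi rfl (by omega)
      show altColsum A i lo ((lo + hi) / 2) + altColsum A i ((lo + hi) / 2) hi = _
      rw [e1, e2]
      have hsplit : List.range' lo (hi - lo)
          = List.range' lo ((lo + hi) / 2 - lo) ++ List.range' ((lo + hi) / 2) (hi - (lo + hi) / 2) := by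
        have := @List.range'_append lo ((lo + hi) / 2 - lo) (hi - (lo + hi) / 2) 1
        simp only [one_mul] at this
        rw [show lo + ((lo + hi) / 2 - lo) = (lo + hi) / 2 by omega,
            show (lo + hi) / 2 - lo + (hi - (lo + hi) / 2) = hi - lo by omega] at this
        exact this.symm
      rw [hsplit, List.map_append, List.sum_append]

-- best computes the max-with-0 of pvCol over the column range
theorem altBest_eq (A : List (List Int)) :
    ∀ (k lo hi : Nat), hi - lo = k → lo ≤ hi →
      altBest A lo hi = pvMax ((List.range' lo (hi - lo)).map (pvCol A)) := by
  intro k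
  induction k using Nat.strong_induction_on with
  | _ k ih =>
    intro lo hi hk hle
    rw [altBest]
    by_cases h1 : hi - lo ≤ 1
    · rw [if_pos h1]
      by_cases h0 : hi - lo = 1
      · rw [if_pos h0, h0]
        have hc := altColsum_eq A lo A.length 0 A.length (by omega) (by omega)
        simp only [Nat.sub_zero, ← List.range_eq_range'] at hc
        have hcol : altColsum A lo 0 A.length = pvCol A lo := hc
        rw [hcol]
        simp only [List.range'_one, List.map_cons, List.map_nil, pvMax, List.foldr_cons,
          List.foldr_nil]
        exact (max_eq_left (by
          apply List.sum_nonneg; intro x hx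
          simp only [List.mem_map] at hx
          obtain ⟨j, _, rfl⟩ := hx
          exact abs_nonneg _)).symm
      · have : hi - lo = 0 := by omega
        simp [this, pvMax]
    · rw [if_neg h1]
      have e1 := ih ((lo + hi) / 2 - lo) (by omega) lo ((lo + hi) / 2) rfl (by omega)
      have e2 := ih (hi - (lo + hi) / 2) (by omega) ((lo + hi) / 2) hi rfl (by omega)
      show max (altBest A lo ((lo + hi) / 2)) (altBest A ((lo + hi) / 2) hi) = _
      rw [e1, e2]
      have hsplit : List.range' lo (hi - lo)
          = List.range' lo ((lo + hi) / 2 - lo) ++ List.range' ((lo + hi) / 2) (hi - (lo + hi) / 2) := by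
        have := @List.range'_append lo ((lo + hi) / 2 - lo) (hi - (lo + hi) / 2) 1
        simp only [one_mul] at this
        rw [show lo + ((lo + hi) / 2 - lo) = (lo + hi) / 2 by omega,
            show (lo + hi) / 2 - lo + (hi - (lo + hi) / 2) = hi - lo by omega] at this
        exact this.symm
      rw [hsplit, List.map_append, pvMax_append]

-- A-side: the outer fold with summ reset to 0 is a running maximum over pvCol
theorem pvA_fold (A : List (List Int)) (l : List Nat) (m : Int) :
    (l.foldl
      (fun (p : Int × Int) i =>
        let s := p.1 + pvCol A i
        (0, if s > p.2 then s else p.2)) (0, m)).2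
    = l.foldl (fun m i => if pvCol A i > m then pvCol A i else m) m := by
  induction l generalizing m with
  | nil => rfl
  | cons a l ih => simpa using ih (if pvCol A a > m then pvCol A a else m)

-- running maximum (with the strict-> test) from base b equals foldl max
theorem pv_ifmax_foldl (l : List Int) (b : Int) :
    l.foldl (fun m x => if x > m then x else m) b = l.foldl max b := by
  induction l generalizing b with
  | nil => rfl
  | cons a l ih =>
    simp only [List.foldl_cons, ih]
    congr 1
    by_cases hb : a > b
    · simp [hb, max_eq_right (le_of_lt hb)]
    · simp [hb, max_eq_left (le_of_not_gt hb)]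

-- foldl max from base b equals max b (foldr max 0) for nonnegative b
theorem pv_foldl_foldr_max (l : List Int) (b : Int) (hb : 0 ≤ b) :
    l.foldl max b = max b (pvMax l) := by
  induction l generalizing b with
  | nil =>
    simp only [List.foldl_nil, pvMax, List.foldr_nil]
    omega
  | cons a l ih =>
    simp only [List.foldl_cons, pvMax, List.foldr_cons] at *
    rw [ih _ (le_max_of_le_left hb), max_assoc]

-- A's port equals the running maximum of pvCol over the columns
theorem pvA_eq (A : List (List Int)) :
    getSecondNorma A = pvMax ((List.range A.length).map (pvCol A)) := by
  unfold getSecondNorma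
  simp only [PySem.List.pyRange_zero_nat, List.foldl_map, PySem.List.pyGetD_natCast]
  have hinner : ∀ (i : Nat) (s : Int),
      (List.range A.length).foldl (fun summ j => summ + |(A.getD j []).getD i 0|) s
      = s + pvCol A i := by
    intro i s
    rw [PySem.List.foldl_add]
    rfl
  simp only [hinner]
  rw [pvA_fold A (List.range A.length) 0]
  have : (List.range A.length).foldl (fun m i => if pvCol A i > m then pvCol A i else m) 0
      = ((List.range A.length).map (pvCol A)).foldl (fun m x => if x > m then x else m) 0 := by
    rw [List.foldl_map]
  rw [this, pv_ifmax_foldl, pv_foldl_foldr_max _ _ le_rfl]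
  exact max_eq_right (pvMax_nonneg _)

theorem pv_main (A : List (List Int)) : getSecondNorma A = getSecondNorma_alt A := by
  rw [pvA_eq]
  unfold getSecondNorma_alt
  rw [altBest_eq A A.length 0 A.length rfl (by omega)]
  rw [Nat.sub_zero, ← List.range_eq_range']

-- ===== VERDICT (by name: the statement is the Claim_ definition above) =====
theorem getSecondNorma_spec : Claim_equal_getSecondNorma := by
  intro A _ _
  unfold Spec_getSecondNorma
  exact pv_main A
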